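-- pv_equiv track=rewrite | github.com/seal-research/notebook-testing | kaggle_versions_eval/versionEval.py | extract_code_with_assertions
-- ===== SOURCE A (Python) =====
-- def extract_code_with_assertions(code):
--     """Extract code lines with their associated assertions, maintaining order"""
--     lines = code.split('\n')
--     code_blocks = []
--     current_block = []
--
--     for line in lines:
--         if line.strip().startswith('nbtest.assert'):
--             # If we have accumulated code, save it with this assertion
--             if current_block:
--                 code_blocks.append({
--                     'code': '\n'.join(current_block),
--                     'assertion': line
--                 })
--                 current_block = []
--             else:
--                 # Assertion without preceding code (edge case)
--                 code_blocks.append({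
--                     'code': '',
--                     'assertion': line
--                 })
--         else:
--             # Regular code line
--             if line.strip():
--                 current_block.append(line)
--
--     # Handle any remaining code
--     if current_block:
--         code_blocks.append({
--             'code': '\n'.join(current_block),
--             'assertion': None
--         })
--
--     return code_blocks
-- ===== SOURCE B (Python) =====
-- def extract_code_with_assertions(code):
--     """Extract code lines with their associated assertions, maintaining order"""
--     lines = code.split('\n')
--     blocks = []
--     while True:
--         split = None
--         for i, line in enumerate(lines):
--             if line.strip().startswith('nbtest.assert'):
--                 split = (lines[:i], line, lines[i + 1:])
--                 break
--         if split is None: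
--             rest = [x for x in lines if x.strip()]
--             if rest:
--                 blocks.append({'code': '\n'.join(rest), 'assertion': None})
--             return blocks
--         pre, assertion, post = split
--         kept = [x for x in pre if x.strip()]
--         blocks.append({'code': '\n'.join(kept), 'assertion': assertion})
--         lines = post
-- ===== Notes on version B (the rewrite author's own statement) =====
-- stated objective: alternative
-- what changed: B replaces A's single pass with an incremental current_block accumulator by repeated splitting: find the first assertion line, slice out the lines before it, keep their non-blank ones and join, then recurse on the remainder (and filter-join the tail for the final assertion-less block).
import Mathlib
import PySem

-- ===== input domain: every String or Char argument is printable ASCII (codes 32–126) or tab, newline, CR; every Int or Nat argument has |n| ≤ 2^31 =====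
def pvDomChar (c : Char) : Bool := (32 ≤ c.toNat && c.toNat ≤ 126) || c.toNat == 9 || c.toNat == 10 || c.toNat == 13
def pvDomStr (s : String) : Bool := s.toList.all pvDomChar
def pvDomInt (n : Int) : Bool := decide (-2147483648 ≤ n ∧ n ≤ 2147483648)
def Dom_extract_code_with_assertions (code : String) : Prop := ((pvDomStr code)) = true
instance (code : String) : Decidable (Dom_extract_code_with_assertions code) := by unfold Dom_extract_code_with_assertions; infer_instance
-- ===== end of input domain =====

-- B replaces A's incremental accumulator with repeated splitting at the first assertion line
-- (slice before it, keep its non-blank lines, recurse on the remainder): an alternative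
-- decomposition of the same O(n) task. Proved: A = B on every input (both are total).

-- ===== PORT A =====

-- line.strip().startswith('nbtest.assert')  (shared predicate of both Pythons)
def pvIsAssert (l : String) : Bool := PySem.Str.startswith (PySem.Str.strip l) "nbtest.assert"

-- a {'code': c, 'assertion': a} dict as an association list
def pvBlk (c : String) (a : Option String) : List (String × Option String) :=
  [("code", some c), ("assertion", a)]

-- the for-loop of A: state = (code_blocks, current_block)
def pvStepA (st : List (List (String × Option String)) × List String) (line : String) :
    List (List (String × Option String)) × List String :=
  if pvIsAssert line then
    if st.2 ≠ [] then (st.1 ++ [pvBlk (PySem.Str.join "\n" st.2) (some line)], [])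
    else (st.1 ++ [pvBlk "" (some line)], [])
  else
    if PySem.Str.strip line ≠ "" then (st.1, st.2 ++ [line]) else st

def extract_code_with_assertions (code : String) : List (List (String × Option String)) :=
  let lines := ((PySem.Str.split? code "\n").getD [])
  let r := lines.foldl pvStepA ([], [])
  if r.2 ≠ [] then r.1 ++ [pvBlk (PySem.Str.join "\n" r.2) none] else r.1

-- ===== PORT B =====

-- the inner for-loop of B: first assertion line, as (lines before it, that line, lines after it)
def pvSplitAtAssert : List String → Option (List String × String × List String)
  | [] => none
  | l :: rest =>
    if pvIsAssert l then some ([], l, rest)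
    else
      match pvSplitAtAssert rest with
      | none => none
      | some (pre, a, post) => some (l :: pre, a, post)

theorem pvSplitAtAssert_post_length :
    ∀ (lines pre : List String) (a : String) (post : List String),
      pvSplitAtAssert lines = some (pre, a, post) → post.length < lines.length := by
  intro lines
  induction lines with
  | nil => intro pre a post h; simp [pvSplitAtAssert] at h
  | cons l rest ih =>
    intro pre a post h
    simp only [pvSplitAtAssert] at h
    by_cases hp : pvIsAssert l = true
    · simp [hp] at h
      obtain ⟨-, -, h3⟩ := h
      simp [← h3]
    · simp [hp] at h
      cases hr : pvSplitAtAssert rest with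
      | none => rw [hr] at h; simp at h
      | some t =>
        obtain ⟨pre', a', post'⟩ := t
        rw [hr] at h
        simp at h
        have := ih pre' a' post' hr
        obtain ⟨-, -, h3⟩ := h
        simp [← h3]; omega

-- the outer while-loop of B
def pvGoB (lines : List String) : List (List (String × Option String)) :=
  match h : pvSplitAtAssert lines with
  | none =>
    let rest := lines.filter (fun x => PySem.Str.strip x != "")
    if rest ≠ [] then [pvBlk (PySem.Str.join "\n" rest) none] else []
  | some (pre, a, post) =>
    pvBlk (PySem.Str.join "\n" (pre.filter (fun x => PySem.Str.strip x != ""))) (some a) :: pvGoB post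
termination_by lines.length
decreasing_by exact pvSplitAtAssert_post_length lines pre a post h

def extract_code_with_assertions_alt (code : String) : List (List (String × Option String)) :=
  pvGoB (((PySem.Str.split? code "\n").getD []))

-- ===== PRECONDITION & SPEC =====
def Spec_extract_code_with_assertions (code : String) (out : List (List (String × Option String))) : Prop := out = extract_code_with_assertions_alt code
instance (code : String) (out : List (List (String × Option String))) : Decidable (Spec_extract_code_with_assertions code out) := by unfold Spec_extract_code_with_assertions; infer_instance

-- ===== CLAIM (what is proved, stated in full; the proofs are below) =====
def Claim_equal_extract_code_with_assertions : Prop := ∀ (code : String), Dom_extract_code_with_assertions code → Spec_extract_code_with_assertions code (extract_code_with_assertions code)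

-- ===== LEMMAS AND PROOFS =====

-- unfolding equations for the well-founded pvGoB
theorem pvGoB_none (lines : List String) (h : pvSplitAtAssert lines = none) :
    pvGoB lines = (if lines.filter (fun x => PySem.Str.strip x != "") ≠ [] then
      [pvBlk (PySem.Str.join "\n" (lines.filter (fun x => PySem.Str.strip x != ""))) none]
      else []) := by
  rw [pvGoB.eq_def]
  split
  · rfl
  · rename_i pre a post heq; rw [h] at heq; exact absurd heq (by simp)

theorem pvGoB_some (lines pre : List String) (a : String) (post : List String)
    (h : pvSplitAtAssert lines = some (pre, a, post)) :
    pvGoB lines = pvBlk (PySem.Str.join "\n" (pre.filter (fun x => PySem.Str.strip x != "")))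
      (some a) :: pvGoB post := by
  rw [pvGoB.eq_def]
  split
  · rename_i heq; rw [h] at heq; exact absurd heq (by simp)
  · rename_i pre' a' post' heq
    rw [h] at heq
    obtain ⟨h1, h2, h3⟩ : pre = pre' ∧ a = a' ∧ post = post' := by
      injection heq with h'; injection h' with ha hb; injection hb with hb hc
      exact ⟨ha, hb, hc⟩
    subst h1; subst h2; subst h3; rfl

theorem pvSplitAtAssert_append_of_no_assert (cur : List String)
    (hcur : ∀ l ∈ cur, pvIsAssert l = false) (lines : List String) :
    pvSplitAtAssert (cur ++ lines) =
      match pvSplitAtAssert lines with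
      | none => none
      | some (pre, a, post) => some (cur ++ pre, a, post) := by
  induction cur with
  | nil => cases h : pvSplitAtAssert lines with
    | none => simp [h]
    | some t => obtain ⟨pre, a, post⟩ := t; simp [h]
  | cons c cur ih =>
    have hc : pvIsAssert c = false := hcur c (by simp)
    have ih' := ih (fun l hl => hcur l (by simp [hl]))
    simp only [List.cons_append, pvSplitAtAssert, hc, Bool.false_eq_true, if_false, ih']
    cases h : pvSplitAtAssert lines with
    | none => simp
    | some t => obtain ⟨pre, a, post⟩ := t; simp

theorem pvJoinNil : PySem.Str.join "\n" ([] : List String) = "" := by decide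

theorem pvFilterSelf (cur : List String)
    (hcur : ∀ l ∈ cur, pvIsAssert l = false ∧ PySem.Str.strip l ≠ "") :
    cur.filter (fun x => PySem.Str.strip x != "") = cur := by
  apply List.filter_eq_self.mpr
  intro l hl; simpa using (hcur l hl).2

-- the trailing 'if current_block' of A, as a function of the loop's final state
def pvFinal (r : List (List (String × Option String)) × List String) :
    List (List (String × Option String)) :=
  if r.2 ≠ [] then r.1 ++ [pvBlk (PySem.Str.join "\n" r.2) none] else r.1

theorem pvMain (lines : List String) :
    ∀ (blocks : List (List (String × Option String))) (cur : List String),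
      (∀ l ∈ cur, pvIsAssert l = false ∧ PySem.Str.strip l ≠ "") →
      pvFinal (lines.foldl pvStepA (blocks, cur)) = blocks ++ pvGoB (cur ++ lines) := by
  induction lines with
  | nil =>
    intro blocks cur hcur
    have hsplit := pvSplitAtAssert_append_of_no_assert cur (fun l hl => (hcur l hl).1) []
    simp only [pvSplitAtAssert, List.append_nil] at hsplit
    simp only [List.foldl_nil, List.append_nil]
    rw [pvGoB_none cur hsplit, pvFilterSelf cur hcur]
    by_cases hc : cur = []
    · simp [hc, pvFinal]
    · simp [hc, pvFinal]
  | cons line rest ih =>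
    intro blocks cur hcur
    simp only [List.foldl_cons]
    by_cases hp : pvIsAssert line = true
    · -- assertion line
      have hjoin : pvStepA (blocks, cur) line =
          (blocks ++ [pvBlk (PySem.Str.join "\n" cur) (some line)], ([] : List String)) := by
        by_cases hc : cur = []
        · subst hc; simp [pvStepA, hp, pvJoinNil]
        · simp [pvStepA, hp, hc]
      rw [hjoin, ih (blocks ++ [pvBlk (PySem.Str.join "\n" cur) (some line)]) [] (by simp)]
      have hsplit := pvSplitAtAssert_append_of_no_assert cur (fun l hl => (hcur l hl).1)
        (line :: rest)
      simp only [pvSplitAtAssert, hp, if_true, List.append_nil] at hsplit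
      rw [pvGoB_some (cur ++ line :: rest) cur line rest hsplit, pvFilterSelf cur hcur]
      simp
    · by_cases hb : PySem.Str.strip line ≠ ""
      · -- non-blank code line
        have hstep : pvStepA (blocks, cur) line = (blocks, cur ++ [line]) := by
          simp [pvStepA, hp, hb]
        have hcur' : ∀ l ∈ cur ++ [line], pvIsAssert l = false ∧ PySem.Str.strip l ≠ "" := by
          intro l hl
          rcases List.mem_append.mp hl with h | h
          · exact hcur l h
          · simp at h; subst h; exact ⟨by simpa using hp, hb⟩
        rw [hstep, ih blocks (cur ++ [line]) hcur']
        simp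
      · -- blank line: dropped by both
        rw [not_ne_iff] at hb
        have hstep : pvStepA (blocks, cur) line = (blocks, cur) := by
          simp [pvStepA, hp, hb]
        rw [hstep, ih blocks cur hcur]
        congr 1
        have hnoassert : ∀ l ∈ cur, pvIsAssert l = false := fun l hl => (hcur l hl).1
        have hs1 := pvSplitAtAssert_append_of_no_assert cur hnoassert rest
        have hs2 := pvSplitAtAssert_append_of_no_assert cur hnoassert (line :: rest)
        have hline : pvSplitAtAssert (line :: rest) =
            match pvSplitAtAssert rest with
            | none => none
            | some (pre, a, post) => some (line :: pre, a, post) := by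
          simp only [pvSplitAtAssert, hp, Bool.false_eq_true, if_false]
        rw [hline] at hs2
        have hbf : (PySem.Str.strip line != "") = false := by simp [hb]
        cases h : pvSplitAtAssert rest with
        | none =>
          rw [h] at hs1 hs2
          simp only at hs1 hs2
          rw [pvGoB_none _ hs1, pvGoB_none _ hs2]
          simp [List.filter_append, hbf]
        | some t =>
          obtain ⟨pre, a, post⟩ := t
          rw [h] at hs1 hs2
          simp only at hs1 hs2
          rw [pvGoB_some _ _ _ _ hs1, pvGoB_some _ _ _ _ hs2]
          simp [List.filter_append, hbf]

-- ===== VERDICT (by name: the statement is the Claim_ definition above) =====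
theorem extract_code_with_assertions_spec : Claim_equal_extract_code_with_assertions := by
  intro code _
  unfold Spec_extract_code_with_assertions extract_code_with_assertions
    extract_code_with_assertions_alt
  have h := pvMain (((PySem.Str.split? code "\n").getD [])) [] [] (by simp)
  simpa [pvFinal] using h
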